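-- pv_equiv track=rewrite | github.com/winkitee/coding-interview-problems | 61-70/64_distribute_bonuses.py | getBonuses
-- ===== SOURCE A (Python) =====
-- def getBonuses(performance):
--     bonuses = [1 for _ in range(len(performance))]
--
--     for i in range(1, len(performance)):
--         left = performance[i - 1]
--         right = performance[i]
--         if (left < right):
--             bonuses[i] += 1
--
--     for i in range(len(performance) - 2, -1, -1):
--         left = performance[i]
--         right = performance[i + 1]
--         if (left > right):
--             bonuses[i] += 1
--
--     return bonuses
-- ===== SOURCE B (Python) =====
-- def getBonuses(performance):
--     if not performance:
--         return []
--     bonuses = [1]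
--     prev = performance[0]
--     for cur in performance[1:]:
--         if prev > cur:
--             bonuses[-1] += 1
--         bonuses.append(2 if prev < cur else 1)
--         prev = cur
--     return bonuses
-- ===== Notes on version B (the rewrite author's own statement) =====
-- stated objective: alternative
-- what changed: Replaces A's pre-initialized bonus array with two directional index passes by a single streaming pass that grows the output one element at a time, appending each new bonus and retro-patching only the previously appended entry when a descent is observed.
import Mathlib
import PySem

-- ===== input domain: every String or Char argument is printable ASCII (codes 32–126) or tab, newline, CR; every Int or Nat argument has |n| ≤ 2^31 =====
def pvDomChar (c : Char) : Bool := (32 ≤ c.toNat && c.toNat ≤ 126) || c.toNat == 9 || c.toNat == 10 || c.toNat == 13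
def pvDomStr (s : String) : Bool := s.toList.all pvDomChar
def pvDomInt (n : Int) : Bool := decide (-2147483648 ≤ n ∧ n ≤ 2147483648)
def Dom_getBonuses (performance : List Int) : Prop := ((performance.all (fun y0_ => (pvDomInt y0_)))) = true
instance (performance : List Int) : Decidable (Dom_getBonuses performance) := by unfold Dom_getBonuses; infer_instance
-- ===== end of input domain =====

-- B replaces A's pre-initialized array and two directional passes with one streaming pass
-- that appends each bonus and retro-patches only the last appended entry (objective: alternative).

-- ===== PORT A =====
def getBonuses (performance : List Int) : List Int :=
  let bonuses := (List.range performance.length).map (fun _ => (1 : Int))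
  let bonuses := (PySem.List.pyRange 1 performance.length 1).foldl
    (fun b i =>
      let left := PySem.List.pyGetD performance (i - 1) 0
      let right := PySem.List.pyGetD performance i 0
      if left < right then PySem.List.pySetD b i (PySem.List.pyGetD b i 0 + 1) else b)
    bonuses
  let bonuses := (PySem.List.pyRange ((performance.length : Int) - 2) (-1) (-1)).foldl
    (fun b i =>
      let left := PySem.List.pyGetD performance i 0
      let right := PySem.List.pyGetD performance (i + 1) 0
      if left > right then PySem.List.pySetD b i (PySem.List.pyGetD b i 0 + 1) else b)
    bonuses
  bonuses

-- ===== PORT B =====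
-- loop body of Source B's for-loop; 'bonuses[-1] += 1' is ported as dropLast ++ [last + 1],
-- exact here because bonuses is always nonempty
def pvStepB (st : List Int × Int) (cur : Int) : List Int × Int :=
  let bonuses := st.1
  let prev := st.2
  let bonuses := if prev > cur then bonuses.dropLast ++ [bonuses.getLastD 0 + 1] else bonuses
  (bonuses ++ [if prev < cur then (2 : Int) else 1], cur)

def getBonuses_alt (performance : List Int) : List Int :=
  match performance with
  | [] => []
  | p0 :: rest => (rest.foldl pvStepB ([1], p0)).1

-- ===== PRECONDITION & SPEC =====
def Spec_getBonuses (performance : List Int) (out : List Int) : Prop := out = getBonuses_alt performance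
instance (performance : List Int) (out : List Int) : Decidable (Spec_getBonuses performance out) := by unfold Spec_getBonuses; infer_instance

-- ===== CLAIM (what is proved, stated in full; the proofs are below) =====
def Claim_equal_getBonuses : Prop := ∀ (performance : List Int), Dom_getBonuses performance → Spec_getBonuses performance (getBonuses performance)

-- ===== LEMMAS AND PROOFS =====

-- the common per-index characterisation both ports are proved equal to
def pvF (p : List Int) : List Int :=
  (List.range p.length).map (fun k =>
    1 + (if 0 < k ∧ p.getD (k - 1) 0 < p.getD k 0 then (1 : Int) else 0)
      + (if k + 1 < p.length ∧ p.getD (k + 1) 0 < p.getD k 0 then (1 : Int) else 0))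

theorem pvF_length (p : List Int) : (pvF p).length = p.length := by simp [pvF]

theorem pvF_get (p : List Int) (k : Nat) (hk : k < p.length) :
    (pvF p)[k]'(by rw [pvF_length]; exact hk) =
      1 + (if 0 < k ∧ p.getD (k - 1) 0 < p.getD k 0 then (1 : Int) else 0)
        + (if k + 1 < p.length ∧ p.getD (k + 1) 0 < p.getD k 0 then (1 : Int) else 0) := by
  simp [pvF]

theorem pvF_getD (p : List Int) (k : Nat) (hk : k < p.length) :
    (pvF p).getD k 0 =
      1 + (if 0 < k ∧ p.getD (k - 1) 0 < p.getD k 0 then (1 : Int) else 0)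
        + (if k + 1 < p.length ∧ p.getD (k + 1) 0 < p.getD k 0 then (1 : Int) else 0) := by
  rw [List.getD_eq_getElem _ 0 (by rw [pvF_length]; exact hk)]
  exact pvF_get p k hk

-- One "bump pass": folding 'if c i then set i (get i + 1)' over a nodup list of in-range
-- indices keeps the length and adds 1 exactly at the indices i ∈ L with c i.
theorem pv_bump_length (c : Int → Prop) [DecidablePred c]
    (L : List Int) (b : List Int) :
    ((L.foldl (fun b i => if c i then PySem.List.pySetD b i (PySem.List.pyGetD b i 0 + 1) else b) b).length = b.length) := by
  induction L generalizing b with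
  | nil => rfl
  | cons i L ih =>
    simp only [List.foldl_cons]
    rw [ih]
    split_ifs with h
    · simp [PySem.List.length_pySetD]
    · rfl

theorem pv_bump_get (c : Int → Prop) [DecidablePred c]
    (L : List Int) (b : List Int) (hnd : L.Nodup)
    (hL : ∀ i ∈ L, 0 ≤ i ∧ i < (b.length : Int)) :
    ∀ j : Int, 0 ≤ j → j < (b.length : Int) →
      PySem.List.pyGetD (L.foldl (fun b i => if c i then PySem.List.pySetD b i (PySem.List.pyGetD b i 0 + 1) else b) b) j 0
        = PySem.List.pyGetD b j 0 + (if j ∈ L ∧ c j then 1 else 0) := by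
  induction L generalizing b with
  | nil => intro j _ _; simp
  | cons i L ih =>
    intro j hj0 hjlen
    obtain ⟨hi0, hilen⟩ := hL i (List.mem_cons_self ..)
    have hstep : ∀ b' : List Int, b'.length = b.length →
        ((if c i then PySem.List.pySetD b' i (PySem.List.pyGetD b' i 0 + 1) else b') : List Int).length = b.length := by
      intro b' hb'
      split_ifs with h
      · simp [PySem.List.length_pySetD, hb']
      · exact hb'
    simp only [List.foldl_cons]
    have hlen1 := hstep b rfl
    rw [ih _ (List.nodup_cons.mp hnd).2
        (by intro k hk; have := hL k (List.mem_cons_of_mem _ hk); rw [hlen1]; exact this)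
        j hj0 (by rw [hlen1]; exact hjlen)]
    · -- evaluate the head step at j
      by_cases hci : c i
      · simp only [if_pos hci]
        have hi' : i = ((i.toNat : Nat) : Int) := by omega
        have hj' : j = ((j.toNat : Nat) : Int) := by omega
        have hitoNat : i.toNat < b.length := by omega
        rw [hi', hj', PySem.List.pyGetD_pySetD_natCast b i.toNat j.toNat _ 0 hitoNat]
        rw [← hi', ← hj']
        by_cases hji : j.toNat = i.toNat
        · have hj_eq : j = i := by omega
          subst hj_eq
          have hnotL : j ∉ L := (List.nodup_cons.mp hnd).1
          simp [hnotL, hci]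
        · have hne : j ≠ i := by omega
          rw [if_neg hji]
          have hjiL : (j ∈ i :: L ∧ c j) ↔ (j ∈ L ∧ c j) := by
            constructor
            · rintro ⟨hm, hc⟩
              rcases List.mem_cons.mp hm with h | h
              · exact absurd h hne
              · exact ⟨h, hc⟩
            · rintro ⟨hm, hc⟩; exact ⟨List.mem_cons_of_mem _ hm, hc⟩
          rw [if_congr hjiL rfl rfl]
      · simp only [if_neg hci]
        have hjiL : (j ∈ i :: L ∧ c j) ↔ (j ∈ L ∧ c j) := by
          constructor
          · rintro ⟨hm, hc⟩
            rcases List.mem_cons.mp hm with h | h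
            · subst h; exact absurd hc hci
            · exact ⟨h, hc⟩
          · rintro ⟨hm, hc⟩; exact ⟨List.mem_cons_of_mem _ hm, hc⟩
        rw [if_congr hjiL rfl rfl]

-- A computes pvF
theorem pv_A_eq_F (p : List Int) : getBonuses p = pvF p := by
  have hA : getBonuses p =
      (PySem.List.pyRange ((p.length : Int) - 2) (-1) (-1)).foldl
        (fun b i => if PySem.List.pyGetD p i 0 > PySem.List.pyGetD p (i + 1) 0 then
            PySem.List.pySetD b i (PySem.List.pyGetD b i 0 + 1) else b)
        ((PySem.List.pyRange 1 (p.length : Int) 1).foldl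
          (fun b i => if PySem.List.pyGetD p (i - 1) 0 < PySem.List.pyGetD p i 0 then
              PySem.List.pySetD b i (PySem.List.pyGetD b i 0 + 1) else b)
          ((List.range p.length).map (fun _ => (1 : Int)))) := by
    unfold getBonuses
    rfl
  have hinitlen : ((List.range p.length).map (fun _ => (1 : Int))).length = p.length := by simp
  have hlen1 := pv_bump_length (fun i : Int => PySem.List.pyGetD p (i - 1) 0 < PySem.List.pyGetD p i 0)
      (PySem.List.pyRange 1 (p.length : Int) 1) ((List.range p.length).map (fun _ => (1 : Int)))
  have hlen2 := pv_bump_length (fun i : Int => PySem.List.pyGetD p i 0 > PySem.List.pyGetD p (i + 1) 0)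
      (PySem.List.pyRange ((p.length : Int) - 2) (-1) (-1))
      ((PySem.List.pyRange 1 (p.length : Int) 1).foldl
        (fun b i => if PySem.List.pyGetD p (i - 1) 0 < PySem.List.pyGetD p i 0 then
            PySem.List.pySetD b i (PySem.List.pyGetD b i 0 + 1) else b)
        ((List.range p.length).map (fun _ => (1 : Int))))
  have hAlen : (getBonuses p).length = p.length := by
    rw [hA, hlen2, hlen1, hinitlen]
  apply List.ext_getElem (by rw [hAlen, pvF_length])
  intro k hk hk'
  rw [hAlen] at hk
  rw [pvF_get p k hk]
  -- A side value at k
  have hget1 := pv_bump_get (fun i : Int => PySem.List.pyGetD p (i - 1) 0 < PySem.List.pyGetD p i 0)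
      (PySem.List.pyRange 1 (p.length : Int) 1) ((List.range p.length).map (fun _ => (1 : Int)))
      (PySem.List.nodup_pyRange_one _ _)
      (by intro i hi; rw [PySem.List.mem_pyRange_one] at hi; rw [hinitlen]; omega)
      (k : Int) (by omega) (by rw [hinitlen]; omega)
  have hget2 := pv_bump_get (fun i : Int => PySem.List.pyGetD p i 0 > PySem.List.pyGetD p (i + 1) 0)
      (PySem.List.pyRange ((p.length : Int) - 2) (-1) (-1))
      ((PySem.List.pyRange 1 (p.length : Int) 1).foldl
        (fun b i => if PySem.List.pyGetD p (i - 1) 0 < PySem.List.pyGetD p i 0 then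
            PySem.List.pySetD b i (PySem.List.pyGetD b i 0 + 1) else b)
        ((List.range p.length).map (fun _ => (1 : Int))))
      (by rw [PySem.List.pyRange_neg_one_eq_reverse]; exact List.nodup_reverse.mpr (PySem.List.nodup_pyRange_one _ _))
      (by intro i hi; rw [PySem.List.mem_pyRange_neg_one] at hi; rw [hlen1, hinitlen]; omega)
      (k : Int) (by omega) (by rw [hlen1, hinitlen]; omega)
  have hinitk : PySem.List.pyGetD ((List.range p.length).map (fun _ => (1 : Int))) (k : Int) 0 = 1 := by
    rw [PySem.List.pyGetD_ofNat _ _ _ (by rw [hinitlen]; exact hk)]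
    simp
  have hAk : (getBonuses p)[k]' (by omega) =
      PySem.List.pyGetD (getBonuses p) (k : Int) 0 :=
    (PySem.List.pyGetD_ofNat _ _ _ (by omega)).symm
  rw [hAk, hA, hget2, hget1, hinitk]
  have e1 : ((k : Int) ∈ PySem.List.pyRange 1 (p.length : Int) 1 ∧
      PySem.List.pyGetD p ((k : Int) - 1) 0 < PySem.List.pyGetD p (k : Int) 0) ↔
      (0 < k ∧ p.getD (k - 1) 0 < p.getD k 0) := by
    rw [PySem.List.mem_pyRange_one]
    by_cases hk0 : 0 < k
    · have hc : ((k : Int) - 1) = ((k - 1 : Nat) : Int) := by omega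
      rw [hc]
      simp only [PySem.List.pyGetD_natCast]
      constructor
      · rintro ⟨_, h⟩; exact ⟨hk0, h⟩
      · rintro ⟨_, h⟩; exact ⟨⟨by omega, by omega⟩, h⟩
    · have : k = 0 := by omega
      subst this
      simp
  have e2 : ((k : Int) ∈ PySem.List.pyRange ((p.length : Int) - 2) (-1) (-1) ∧
      PySem.List.pyGetD p (k : Int) 0 > PySem.List.pyGetD p ((k : Int) + 1) 0) ↔
      (k + 1 < p.length ∧ p.getD (k + 1) 0 < p.getD k 0) := by
    rw [PySem.List.mem_pyRange_neg_one]
    have hc : ((k : Int) + 1) = ((k + 1 : Nat) : Int) := by omega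
    rw [hc]
    simp only [PySem.List.pyGetD_natCast]
    constructor
    · rintro ⟨⟨_, h2⟩, h⟩; exact ⟨by omega, h⟩
    · rintro ⟨h1, h⟩; exact ⟨⟨by omega, by omega⟩, h⟩
  rw [if_congr e1 rfl rfl, if_congr e2 rfl rfl]


-- pvF over a snoc is exactly one step of B's streaming loop
theorem pvF_snoc (xs : List Int) (hxs : xs ≠ []) (cur : Int) :
    pvF (xs ++ [cur]) =
      (if xs.getLastD 0 > cur then (pvF xs).dropLast ++ [(pvF xs).getLastD 0 + 1] else pvF xs)
        ++ [if xs.getLastD 0 < cur then (2 : Int) else 1] := by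
  have hn : 0 < xs.length := List.length_pos_of_ne_nil hxs
  have hF : (pvF xs).length = xs.length := pvF_length xs
  have hFne : pvF xs ≠ [] := by
    intro h; rw [h] at hF; simp at hF; omega
  have hlast : xs.getLastD 0 = xs.getD (xs.length - 1) 0 := by
    rw [List.getD_eq_getElem xs 0 (by omega), List.getLastD_eq_getLast?,
        List.getLast?_eq_some_getLast hxs, Option.getD_some, List.getLast_eq_getElem]
  have hlastF : (pvF xs).getLastD 0 = (pvF xs).getD (xs.length - 1) 0 := by
    rw [List.getD_eq_getElem _ 0 (by omega), List.getLastD_eq_getLast?,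
        List.getLast?_eq_some_getLast hFne, Option.getD_some, List.getLast_eq_getElem]
    congr 1
    omega
  have hqd : ∀ j, j < xs.length → (xs ++ [cur]).getD j 0 = xs.getD j 0 :=
    fun j hj => List.getD_append xs [cur] 0 j hj
  have hgdn : (xs ++ [cur]).getD xs.length 0 = cur := by simp
  have hql : (xs ++ [cur]).length = xs.length + 1 := by simp
  have happ : ∀ (as : List Int) (x : Int), (as ++ [x]).getD as.length 0 = x := by
    intro as x; simp
  have hPl : (if xs.getLastD 0 > cur then (pvF xs).dropLast ++ [(pvF xs).getLastD 0 + 1] else pvF xs).length = xs.length := by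
    split_ifs <;> simp [hF] <;> omega
  have hdrop : ∀ j, j < xs.length - 1 → ((pvF xs).dropLast).getD j 0 = (pvF xs).getD j 0 := by
    intro j hj
    rw [List.getD_eq_getElem _ 0 (by simp [hF]; omega), List.getElem_dropLast,
        List.getD_eq_getElem _ 0 (by omega)]
  apply List.ext_getElem (by
    simp only [pvF_length, hql, List.length_append, hPl, List.length_cons, List.length_nil])
  intro k hk hk'
  have hkb : k < xs.length + 1 := by
    rw [pvF_length, hql] at hk; exact hk
  rw [← List.getD_eq_getElem (pvF (xs ++ [cur])) 0 hk, ← List.getD_eq_getElem _ 0 hk']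
  rw [pvF_getD (xs ++ [cur]) k (by rw [hql]; exact hkb)]
  rcases Nat.lt_trichotomy (k + 1) xs.length with hlt | heq | hgt2
  · -- k + 1 < n : untouched entry
    have hR : ((if xs.getLastD 0 > cur then (pvF xs).dropLast ++ [(pvF xs).getLastD 0 + 1] else pvF xs)
        ++ [if xs.getLastD 0 < cur then (2 : Int) else 1]).getD k 0 = (pvF xs).getD k 0 := by
      rw [List.getD_append _ _ 0 k (by rw [hPl]; omega)]
      split_ifs with hgt
      · rw [List.getD_append _ _ 0 k (by simp [hF]; omega), hdrop k (by omega)]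
      · rfl
    rw [hR, pvF_getD xs k (by omega)]
    rw [hqd k (by omega), hqd (k+1) (by omega), hql]
    have e2 : (k + 1 < xs.length + 1 ∧ xs.getD (k+1) 0 < xs.getD k 0) ↔
        (k + 1 < xs.length ∧ xs.getD (k+1) 0 < xs.getD k 0) := by
      constructor <;> rintro ⟨_, h⟩ <;> exact ⟨by omega, h⟩
    rw [if_congr e2 rfl rfl]
    by_cases hk0 : 0 < k
    · rw [hqd (k-1) (by omega)]
    · have hz : k = 0 := by omega
      subst hz
      simp only [Nat.lt_irrefl, false_and, if_false]
  · -- k + 1 = n : last old entry, patched by the backward comparison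
    have hk1 : k = xs.length - 1 := by omega
    have hL : ((pvF xs).dropLast ++ [(pvF xs).getLastD 0 + 1]).getD k 0 = (pvF xs).getLastD 0 + 1 := by
      have hkd : k = ((pvF xs).dropLast).length := by simp [hF]; omega
      rw [hkd]; exact happ _ _
    have hR : ((if xs.getLastD 0 > cur then (pvF xs).dropLast ++ [(pvF xs).getLastD 0 + 1] else pvF xs)
        ++ [if xs.getLastD 0 < cur then (2 : Int) else 1]).getD k 0
        = (pvF xs).getD k 0 + (if xs.getLastD 0 > cur then (1 : Int) else 0) := by
      rw [List.getD_append _ _ 0 k (by rw [hPl]; omega)]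
      split_ifs with hgt
      · rw [hL, hlastF, ← hk1]
      · ring
    rw [hR, pvF_getD xs k (by omega)]
    rw [if_neg (fun h => absurd h.1 (by omega) : ¬ (k + 1 < xs.length ∧ xs.getD (k+1) 0 < xs.getD k 0))]
    rw [hqd k (by omega)]
    have hq1 : (xs ++ [cur]).getD (k+1) 0 = cur := by rw [heq]; exact hgdn
    rw [hq1, hql]
    have e2 : (k + 1 < xs.length + 1 ∧ cur < xs.getD k 0) ↔ (xs.getLastD 0 > cur) := by
      rw [hlast, ← hk1]
      constructor
      · rintro ⟨_, h⟩; exact h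
      · intro h; exact ⟨by omega, h⟩
    rw [if_congr e2 rfl rfl]
    by_cases hk0 : 0 < k
    · rw [hqd (k-1) (by omega)]
      split_ifs <;> ring
    · have hz : k = 0 := by omega
      subst hz
      simp only [Nat.lt_irrefl, false_and, if_false]
      split_ifs <;> ring
  · -- k = n : the newly appended entry
    have hkn : k = xs.length := by omega
    subst hkn
    have hR : ((if xs.getLastD 0 > cur then (pvF xs).dropLast ++ [(pvF xs).getLastD 0 + 1] else pvF xs)
        ++ [if xs.getLastD 0 < cur then (2 : Int) else 1]).getD xs.length 0
        = (if xs.getLastD 0 < cur then (2 : Int) else 1) := by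
      rw [← hPl]; exact happ _ _
    rw [hR, hql]
    rw [if_neg (fun h => absurd h.1 (by omega) :
      ¬ (xs.length + 1 < xs.length + 1 ∧ (xs ++ [cur]).getD (xs.length + 1) 0 < (xs ++ [cur]).getD xs.length 0))]
    rw [hgdn, hqd (xs.length - 1) (by omega)]
    have e1 : (0 < xs.length ∧ xs.getD (xs.length - 1) 0 < cur) ↔ (xs.getLastD 0 < cur) := by
      rw [hlast]
      constructor
      · rintro ⟨_, h⟩; exact h
      · intro h; exact ⟨hn, h⟩
    rw [if_congr e1 rfl rfl]
    split_ifs <;> ring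

-- B's loop maintains 'output = pvF of the consumed prefix'
theorem pv_loop (r : List Int) : ∀ (xs : List Int), xs ≠ [] →
    r.foldl pvStepB (pvF xs, xs.getLastD 0)
      = (pvF (xs ++ r), (xs ++ r).getLastD 0) := by
  induction r with
  | nil => intro xs _; simp
  | cons cur r ih =>
    intro xs hxs
    have hgl : (xs ++ [cur]).getLastD 0 = cur := by simp
    have hstep : pvStepB (pvF xs, xs.getLastD 0) cur
        = (pvF (xs ++ [cur]), (xs ++ [cur]).getLastD 0) := by
      show ((if xs.getLastD 0 > cur then (pvF xs).dropLast ++ [(pvF xs).getLastD 0 + 1] else pvF xs)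
          ++ [if xs.getLastD 0 < cur then (2 : Int) else 1], cur)
        = (pvF (xs ++ [cur]), (xs ++ [cur]).getLastD 0)
      rw [← pvF_snoc xs hxs cur, hgl]
    simp only [List.foldl_cons]
    rw [hstep, ih (xs ++ [cur]) (by simp), List.append_assoc, List.singleton_append]

theorem pv_B_eq_F (p : List Int) : getBonuses_alt p = pvF p := by
  cases p with
  | nil => simp [getBonuses_alt, pvF]
  | cons p0 rest =>
    show (rest.foldl pvStepB ([1], p0)).1 = pvF (p0 :: rest)
    have h1 : pvF [p0] = [1] := by simp [pvF]
    have h3 := pv_loop rest [p0] (by simp)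
    rw [h1] at h3
    simpa using congrArg Prod.fst h3

-- ===== VERDICT (by name: the statement is the Claim_ definition above) =====
theorem getBonuses_spec : Claim_equal_getBonuses := by
  intro performance _
  unfold Spec_getBonuses
  rw [pv_A_eq_F, pv_B_eq_F]
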